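-- pv_equiv track=rewrite | github.com/pypi-data/pypi-mirror-96 | packages/bfgsupport/bfgsupport-0.0.8-py3-none-any.whl/bfgsupport/source/bidding_hand.py | quantitative_raise
-- ===== SOURCE A (Python) =====
-- def quantitative_raise(points, base_level,
--                        point_list, maximum_level=5):
--     """
--         Return a bid based on a quantitative raise.
--         max raise is the number of elements in pointlist 1, 2,3 or 4
--         scan the (reversed) points list until the points in
--         the hand exceeds the level
--         This shows whether it is a 3,2 or 1 raise etc.
--
--         e.g.
--         level = self.quantitative_raise(points, 1, [6, 10, 13, 16], 5)
--         if points = 11 this raises level = 1+2 = 3.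
--     """
--     maximum_raise = len(point_list)
--     point_list = list(reversed(point_list))
--     raise_level = 0
--     for index, item in enumerate(point_list):
--         if points >= item:
--             raise_level = base_level + maximum_raise - index
--             break
--     if raise_level > maximum_level:
--         raise_level = maximum_level
--     return raise_level
-- ===== SOURCE B (Python) =====
-- def quantitative_raise(points, base_level,
--                        point_list, maximum_level=5):
--     raise_level = 0
--     for j, item in enumerate(point_list):
--         if points >= item:
--             raise_level = base_level + j + 1
--     return min(raise_level, maximum_level)
-- ===== Notes on version B (the rewrite author's own statement) =====
-- stated objective: simpler
-- what changed: Single forward scan with enumerate that overwrites the level at each matching index (last match wins) and a final min() clamp, instead of reversing the list, breaking on the first match with index arithmetic, and a conditional clamp.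
import Mathlib
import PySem

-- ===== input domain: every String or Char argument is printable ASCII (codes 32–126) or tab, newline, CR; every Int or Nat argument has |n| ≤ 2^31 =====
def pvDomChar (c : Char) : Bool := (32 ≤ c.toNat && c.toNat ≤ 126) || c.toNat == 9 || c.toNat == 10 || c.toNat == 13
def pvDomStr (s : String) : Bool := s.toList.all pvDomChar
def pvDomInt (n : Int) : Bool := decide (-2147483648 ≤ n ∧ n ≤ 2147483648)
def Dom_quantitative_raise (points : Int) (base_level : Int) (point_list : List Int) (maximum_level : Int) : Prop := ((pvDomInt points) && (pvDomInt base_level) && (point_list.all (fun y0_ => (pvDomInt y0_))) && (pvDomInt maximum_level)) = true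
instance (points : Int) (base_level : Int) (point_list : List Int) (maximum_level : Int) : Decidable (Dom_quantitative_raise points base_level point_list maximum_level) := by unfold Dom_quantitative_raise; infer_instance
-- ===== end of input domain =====

-- B replaces A's reversed scan with break and conditional clamp by a forward
-- enumerate fold (last match wins) and a final min clamp; objective: simpler.


-- ===== PORT A =====
-- A's for-loop over the reversed list with `break` on the first match:
-- returns 0 if no element matches, else base + maximum_raise - index.
def qrLoopA (points base_level : Int) : List Int → Int → Int → Int
  | [], _, _ => 0
  | item :: rest, maximum_raise, index =>
      if points ≥ item then base_level + maximum_raise - index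
      else qrLoopA points base_level rest maximum_raise (index + 1)

def quantitative_raise (points : Int) (base_level : Int) (point_list : List Int) (maximum_level : Int) : Int :=
  let maximum_raise : Int := point_list.length
  let raise_level := qrLoopA points base_level point_list.reverse maximum_raise 0
  if raise_level > maximum_level then maximum_level else raise_level

-- ===== PORT B =====
def quantitative_raise_alt (points : Int) (base_level : Int) (point_list : List Int) (maximum_level : Int) : Int :=
  let raise_level := (PySem.List.enumerate point_list).foldl
    (fun acc ji => if points ≥ ji.2 then base_level + ji.1 + 1 else acc) 0
  min raise_level maximum_level

-- ===== PRECONDITION & SPEC =====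
def Spec_quantitative_raise (points : Int) (base_level : Int) (point_list : List Int) (maximum_level : Int) (out : Int) : Prop := out = quantitative_raise_alt points base_level point_list maximum_level
instance (points : Int) (base_level : Int) (point_list : List Int) (maximum_level : Int) (out : Int) : Decidable (Spec_quantitative_raise points base_level point_list maximum_level out) := by unfold Spec_quantitative_raise; infer_instance

-- ===== CLAIM (what is proved, stated in full; the proofs are below) =====
def Claim_equal_quantitative_raise : Prop := ∀ (points : Int) (base_level : Int) (point_list : List Int) (maximum_level : Int), Dom_quantitative_raise points base_level point_list maximum_level → Spec_quantitative_raise points base_level point_list maximum_level (quantitative_raise points base_level point_list maximum_level)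

-- ===== LEMMAS AND PROOFS =====

-- qrLoopA depends only on maximum_raise - index.
theorem qrLoopA_shift (points base_level : Int) (l : List Int) (m i : Int) :
    qrLoopA points base_level l (m + 1) (i + 1) = qrLoopA points base_level l m i := by
  induction l generalizing i with
  | nil => rfl
  | cons x xs ih =>
      simp only [qrLoopA]
      split
      · omega
      · exact ih (i + 1)

theorem qrLoopA_eq_foldl (points base_level : Int) (xs : List Int) :
    qrLoopA points base_level xs.reverse (xs.length : Int) 0 =
      (PySem.List.enumerate xs).foldl
        (fun acc ji => if points ≥ ji.2 then base_level + ji.1 + 1 else acc) 0 := by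
  induction xs using List.reverseRecOn with
  | nil => rfl
  | append_singleton ys x ih =>
      rw [List.reverse_append, List.reverse_singleton]
      simp only [List.singleton_append, qrLoopA, List.length_append, List.length_singleton]
      rw [PySem.List.enumerate_append, List.foldl_append]
      simp only [PySem.List.enumerate_cons, PySem.List.enumerate_nil, List.foldl_cons,
        List.foldl_nil, zero_add]
      split
      · push_cast; ring
      · have h := qrLoopA_shift points base_level ys.reverse (ys.length : Int) 0
        simp only [zero_add] at h
        rw [show ((ys.length + 1 : Nat) : Int) = (ys.length : Int) + 1 by push_cast; ring, h]
        exact ih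

-- ===== VERDICT (by name: the statement is the Claim_ definition above) =====
theorem quantitative_raise_spec : Claim_equal_quantitative_raise := by
  intro points base_level point_list maximum_level _
  unfold Spec_quantitative_raise quantitative_raise quantitative_raise_alt
  simp only [qrLoopA_eq_foldl]
  omega
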